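-- pv_equiv track=rewrite | github.com/vladmocanualexandru/advent_of_code | y2015/d11/p2.py | hasLetterPairs
-- ===== SOURCE A (Python) =====
-- def hasLetterPairs(password):
--     found = []
--
--     target = 2
--     while len(found)<target:
--         foundPair = False
--         for i in range(len(password)-1):
--             if password[i]==password[i+1] and not password[i] in found:
--                 found.append(password[i])
--                 foundPair = True
--                 break
--
--         if not foundPair:
--             return False
--
--     return True
-- ===== SOURCE B (Python) =====
-- def hasLetterPairs(password):
--     pairs = set()
--     for i in range(len(password) - 1):
--         if password[i] == password[i + 1]:
--             pairs.add(password[i])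
--     return len(pairs) >= 2
-- ===== Notes on version B (the rewrite author's own statement) =====
-- stated objective: simpler
-- what changed: Replaced the restart-on-each-find while loop (rescan from the start for every new pair letter) by a single linear pass that collects the distinct adjacent-pair letters into a set and checks its size is at least 2.
import Mathlib
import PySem

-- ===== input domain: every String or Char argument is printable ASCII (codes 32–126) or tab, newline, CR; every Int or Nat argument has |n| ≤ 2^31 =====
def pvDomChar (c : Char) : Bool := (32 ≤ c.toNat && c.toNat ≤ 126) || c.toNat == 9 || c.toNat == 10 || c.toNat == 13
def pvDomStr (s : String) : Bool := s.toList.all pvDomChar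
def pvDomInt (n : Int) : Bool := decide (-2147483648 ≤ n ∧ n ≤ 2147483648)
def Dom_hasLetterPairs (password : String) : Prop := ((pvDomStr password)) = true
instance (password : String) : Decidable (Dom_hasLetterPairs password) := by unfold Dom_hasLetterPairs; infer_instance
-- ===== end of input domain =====

-- B replaces A's rescan-from-the-start while loop by one linear pass collecting the
-- distinct adjacent-pair letters into a set; only its size (≥ 2) matters. (objective: simpler)

-- ===== PORT A =====
-- the inner 'for i in range(len(password)-1): if password[i]==password[i+1] and not password[i] in found: … break'
-- : first letter of an adjacent equal pair that is not yet in found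
def pvScanA (found : List Char) : List Char → Option Char
  | a :: b :: rest =>
      if a = b ∧ ¬ found.contains a then some a else pvScanA found (b :: rest)
  | _ => none

-- the 'while len(found)<target' loop (target = 2); found grows by one letter per iteration
def pvLoopA (cs : List Char) (found : List Char) : Bool :=
  if found.length < 2 then
    match pvScanA found cs with
    | some c => pvLoopA cs (found ++ [c])
    | none => false
  else true
termination_by 2 - found.length
decreasing_by simp; omega

def hasLetterPairs (password : String) : Bool :=
  pvLoopA password.toList []

-- ===== PORT B =====
-- 'for i in range(len(password)-1): if password[i]==password[i+1]: pairs.add(password[i])'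
def pvCollectB (s : PySem.Set Char) : List Char → PySem.Set Char
  | a :: b :: rest => pvCollectB (if a = b then PySem.Set.add s a else s) (b :: rest)
  | _ => s

def hasLetterPairs_alt (password : String) : Bool :=
  2 ≤ (pvCollectB PySem.Set.empty password.toList).length

-- ===== PRECONDITION & SPEC =====
def Spec_hasLetterPairs (password : String) (out : Bool) : Prop := out = hasLetterPairs_alt password
instance (password : String) (out : Bool) : Decidable (Spec_hasLetterPairs password out) := by unfold Spec_hasLetterPairs; infer_instance

-- ===== CLAIM (what is proved, stated in full; the proofs are below) =====
def Claim_equal_hasLetterPairs : Prop := ∀ (password : String), Dom_hasLetterPairs password → Spec_hasLetterPairs password (hasLetterPairs password)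

-- ===== LEMMAS AND PROOFS =====

-- letters at equal-adjacent positions, in order, with duplicates
def pvAdjEq : List Char → List Char
  | a :: b :: rest => (if a = b then [a] else []) ++ pvAdjEq (b :: rest)
  | _ => []

theorem pvScanA_eq_find (found : List Char) (cs : List Char) :
    pvScanA found cs = (pvAdjEq cs).find? (fun c => !found.contains c) := by
  induction cs with
  | nil => rfl
  | cons a t ih =>
      cases t with
      | nil => rfl
      | cons b rest =>
          simp only [pvScanA, pvAdjEq]
          by_cases hab : a = b <;> by_cases hc : found.contains a <;>
            simp_all

theorem pvCollectB_eq_foldl (s : PySem.Set Char) (cs : List Char) :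
    pvCollectB s cs = (pvAdjEq cs).foldl PySem.Set.add s := by
  induction cs generalizing s with
  | nil => rfl
  | cons a t ih =>
      cases t with
      | nil => rfl
      | cons b rest =>
          simp only [pvCollectB, pvAdjEq]
          by_cases hab : a = b <;> simp_all

-- number of distinct pair letters not yet in found
def pvFresh (cs found : List Char) : List Char :=
  (PySem.Set.ofList (pvAdjEq cs)).filter (fun c => !found.contains c)

theorem pvFresh_nodup (cs found : List Char) : (pvFresh cs found).Nodup :=
  (PySem.Set.nodup_ofList _).filter _

theorem pvScanA_none_iff (found cs : List Char) :
    pvScanA found cs = none ↔ pvFresh cs found = [] := by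
  rw [pvScanA_eq_find, List.find?_eq_none, pvFresh, List.filter_eq_nil_iff]
  constructor
  · intro h c hc
    have : c ∈ pvAdjEq cs := (PySem.Set.mem_ofList _ _).1 hc
    simpa using h c this
  · intro h c hc
    have : c ∈ PySem.Set.ofList (pvAdjEq cs) := (PySem.Set.mem_ofList _ _).2 hc
    simpa using h c this

theorem pvScanA_some_fresh (found cs : List Char) (c : Char)
    (h : pvScanA found cs = some c) : c ∈ pvFresh cs found := by
  rw [pvScanA_eq_find] at h
  have hmem := List.mem_of_find?_eq_some h
  have hp := List.find?_some h
  simp only [pvFresh, List.mem_filter]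
  exact ⟨(PySem.Set.mem_ofList _ _).2 hmem, hp⟩

-- appending the found letter removes exactly it from the fresh list
theorem pvFresh_append (cs found : List Char) (c : Char) :
    pvFresh cs (found ++ [c]) = (pvFresh cs found).erase c := by
  have hnd := pvFresh_nodup cs found
  rw [List.Nodup.erase_eq_filter hnd c, pvFresh, pvFresh, List.filter_filter]
  apply List.filter_congr
  intro x _
  by_cases hx : x = c
  · simp [hx]
  · simp [hx]

theorem pvLoopA_char (cs : List Char) (found : List Char) :
    pvLoopA cs found = decide (2 ≤ found.length + (pvFresh cs found).length) := by
  generalize hn : (pvFresh cs found).length = n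
  induction n generalizing found with
  | zero =>
      rw [pvLoopA]
      by_cases h2 : found.length < 2
      · have hnone : pvScanA found cs = none :=
          (pvScanA_none_iff found cs).2 (List.eq_nil_of_length_eq_zero hn)
        simp [h2, hnone]

      · simp [h2]; omega
  | succ n ih =>
      rw [pvLoopA]
      by_cases h2 : found.length < 2
      · have hne : pvFresh cs found ≠ [] := by
          intro h; rw [h] at hn; simp at hn
        obtain ⟨c, hc⟩ : ∃ c, pvScanA found cs = some c := by
          cases h : pvScanA found cs with
          | none => exact absurd ((pvScanA_none_iff found cs).1 h) hne
          | some c => exact ⟨c, rfl⟩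
        have hcf : c ∈ pvFresh cs found := pvScanA_some_fresh found cs c hc
        have hlen : (pvFresh cs (found ++ [c])).length = n := by
          rw [pvFresh_append]
          rw [List.length_erase_of_mem hcf, hn]
          omega
        simp only [h2, if_pos, hc]
        rw [ih (found ++ [c]) hlen]
        simp only [List.length_append, List.length_cons, List.length_nil]
        congr 1
        simp
        omega
      · simp [h2]; omega

-- ===== VERDICT (by name: the statement is the Claim_ definition above) =====
theorem hasLetterPairs_spec : Claim_equal_hasLetterPairs := by
  intro password _
  unfold Spec_hasLetterPairs hasLetterPairs hasLetterPairs_alt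
  rw [pvLoopA_char, pvCollectB_eq_foldl]
  have : List.foldl PySem.Set.add PySem.Set.empty (pvAdjEq password.toList)
       = PySem.Set.ofList (pvAdjEq password.toList) :=
    (PySem.Set.ofList_eq_foldl _).symm
  rw [this]
  simp [pvFresh]
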